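-- pv_equiv track=rewrite | github.com/ABRJrocks/Enigma-Language-Compiler-In-Python--Tokenizer--Parser--Semantic--Code-Gen--Output- | optimizer.py | remove_redundant_jumps
-- ===== SOURCE A (Python) =====
-- def remove_redundant_jumps(instructions):
--     optimized_instructions = []
--     for i in range(len(instructions)):
--         if instructions[i].startswith("JMP"):
--             target = instructions[i].split()[-1]
--             if i + 1 < len(instructions) and instructions[i + 1].endswith(f"{target}:"):
--                 continue
--         optimized_instructions.append(instructions[i])
--     return optimized_instructions
-- ===== SOURCE B (Python) =====
-- def remove_redundant_jumps(instructions):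
--     opt = []
--     for ins in instructions:
--         if opt and opt[-1].startswith("JMP"):
--             target = opt[-1].split()[-1]
--             if ins.endswith(f"{target}:"):
--                 opt.pop()
--         opt.append(ins)
--     return opt
-- ===== Notes on version B (the rewrite author's own statement) =====
-- stated objective: alternative
-- what changed: Replaces the index-based loop with a forward look-ahead (i+1 bound check, continue) by a look-behind pass that treats the output as a stack: each instruction peeks at the last emitted one and pops it if it is a JMP to the label the current instruction defines.
import Mathlib
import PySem

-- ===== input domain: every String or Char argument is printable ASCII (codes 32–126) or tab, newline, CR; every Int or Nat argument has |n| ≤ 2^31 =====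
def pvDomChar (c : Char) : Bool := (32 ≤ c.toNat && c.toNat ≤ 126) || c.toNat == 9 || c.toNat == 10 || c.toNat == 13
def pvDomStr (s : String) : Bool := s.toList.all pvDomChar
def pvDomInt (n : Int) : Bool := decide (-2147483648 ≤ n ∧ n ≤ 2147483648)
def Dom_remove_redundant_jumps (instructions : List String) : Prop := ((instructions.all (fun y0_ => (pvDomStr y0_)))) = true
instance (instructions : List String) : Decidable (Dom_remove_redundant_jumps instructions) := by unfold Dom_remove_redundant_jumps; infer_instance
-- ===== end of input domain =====

-- B re-implements the redundant-jump filter as a look-behind pass with a pop on the output stack,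
-- replacing A's index loop with forward look-ahead; same cost, different decomposition (objective: alternative).


-- ===== PORT A =====
-- shared predicate, literally the condition both Pythons test:
-- jmp.startswith("JMP") and nxt.endswith(f"{jmp.split()[-1]}:")
-- (Python's split()[-1] would raise on an empty split, but a string starting with "JMP"
-- always splits into a nonempty list, so the "" default of pyGetD is never used)
def isRedundant (jmp nxt : String) : Bool :=
  PySem.Str.startswith jmp "JMP" &&
    PySem.Str.endswith nxt (PySem.List.pyGetD (PySem.Str.split₀ jmp) (-1) "" ++ ":")

-- A: index loop over instructions, skipping a JMP when the NEXT instruction is its label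
-- (structural recursion on the list with the same one-step look-ahead)
def remove_redundant_jumps : List String → List String
  | [] => []
  | [x] => [x]
  | x :: y :: rest =>
      if isRedundant x y then remove_redundant_jumps (y :: rest)
      else x :: remove_redundant_jumps (y :: rest)

-- ===== PORT B =====
-- B: one pass with the output as a stack; peek at the last emitted instruction and pop it
-- if it is a JMP to the label the current instruction defines, then always append.
def remove_redundant_jumps_alt (instructions : List String) : List String :=
  instructions.foldl
    (fun opt ins =>
      (match opt.getLast? with
       | some t => if isRedundant t ins then opt.dropLast else opt
       | none => opt) ++ [ins])
    []

-- ===== PRECONDITION & SPEC =====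
def Spec_remove_redundant_jumps (instructions : List String) (out : List String) : Prop := out = remove_redundant_jumps_alt instructions
instance (instructions : List String) (out : List String) : Decidable (Spec_remove_redundant_jumps instructions out) := by unfold Spec_remove_redundant_jumps; infer_instance

-- ===== CLAIM (what is proved, stated in full; the proofs are below) =====
def Claim_equal_remove_redundant_jumps : Prop := ∀ (instructions : List String), Dom_remove_redundant_jumps instructions → Spec_remove_redundant_jumps instructions (remove_redundant_jumps instructions)

-- ===== LEMMAS AND PROOFS =====

-- B's fold started from a stack ending in x behaves like A's recursion headed by x.
theorem alt_fold_invariant (l : List String) : ∀ (acc : List String) (x : String),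
    l.foldl
      (fun opt ins =>
        (match opt.getLast? with
         | some t => if isRedundant t ins then opt.dropLast else opt
         | none => opt) ++ [ins])
      (acc ++ [x]) = acc ++ remove_redundant_jumps (x :: l) := by
  induction l with
  | nil => intro acc x; simp [remove_redundant_jumps]
  | cons y rest ih =>
    intro acc x
    simp only [List.foldl_cons, List.getLast?_concat, List.dropLast_concat]
    by_cases h : isRedundant x y
    · simp only [h, if_pos, remove_redundant_jumps, ih acc y]
    · rw [if_neg h]
      have := ih (acc ++ [x]) y
      simp only [List.append_assoc, List.singleton_append] at this ⊢
      rw [this, remove_redundant_jumps, if_neg h]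

-- ===== VERDICT (by name: the statement is the Claim_ definition above) =====
theorem remove_redundant_jumps_spec : Claim_equal_remove_redundant_jumps := by
  intro instructions _
  unfold Spec_remove_redundant_jumps remove_redundant_jumps_alt
  cases instructions with
  | nil => simp [remove_redundant_jumps]
  | cons x l =>
    have := alt_fold_invariant l [] x
    simpa using this.symm
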